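-- pv_equiv track=rewrite | github.com/izzy-el/mitbrazil-intro-python | Set2/p2_3.py | ndoors
-- ===== SOURCE A (Python) =====
-- def ndoors(num_of_doors):
--     open_doors = []
--     counter = 2
--
--     for i in range(1, num_of_doors + 1):
--         open_doors.append(i)
--
--     while counter <= num_of_doors:
--         for i in range(counter, num_of_doors + 1, counter):
--             if i in open_doors:
--                 open_doors.remove(i)
--             else:
--                 open_doors.append(i)
--         counter +=1
--
--     return open_doors
-- ===== SOURCE B (Python) =====
-- def ndoors(num_of_doors):
--     # A door ends open iff it is toggled an odd number of times, i.e. has an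
--     # odd number of divisors, i.e. is a perfect square; A appends each square
--     # for the last time at pass k*k, so its result is the squares in ascending order.
--     open_doors = []
--     k = 1
--     while k * k <= num_of_doors:
--         open_doors.append(k * k)
--         k += 1
--     return open_doors
-- ===== Notes on version B (the rewrite author's own statement) =====
-- stated objective: faster
-- what changed: Replaced the full toggle simulation (list membership tests, remove and append over all multiples of every counter) by the closed-form answer: the open doors are exactly the perfect squares up to num_of_doors, emitted directly in ascending order.
import Mathlib
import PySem

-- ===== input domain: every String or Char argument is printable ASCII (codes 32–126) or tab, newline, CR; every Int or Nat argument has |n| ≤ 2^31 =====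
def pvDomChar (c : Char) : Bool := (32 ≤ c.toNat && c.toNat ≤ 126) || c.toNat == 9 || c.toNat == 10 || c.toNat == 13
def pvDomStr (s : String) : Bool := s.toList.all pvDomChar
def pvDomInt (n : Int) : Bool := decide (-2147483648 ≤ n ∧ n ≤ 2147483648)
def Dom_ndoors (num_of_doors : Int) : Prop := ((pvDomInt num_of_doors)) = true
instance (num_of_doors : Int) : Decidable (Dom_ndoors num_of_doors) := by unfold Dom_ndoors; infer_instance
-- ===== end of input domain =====

-- B replaces A's full toggle simulation by directly emitting the ascending perfect
-- squares not exceeding num_of_doors (objective: faster).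

-- ===== PORT A =====
-- one toggle step of A's inner loop: `if i in open_doors: open_doors.remove(i) else: open_doors.append(i)`
-- (list.remove under the `in` guard removes the first occurrence — List.erase is exact there)
def pyTog (od : List Int) (i : Int) : List Int :=
  if i ∈ od then od.erase i else od ++ [i]

-- the `while counter <= num_of_doors` loop; each iteration runs the inner
-- `for i in range(counter, num_of_doors + 1, counter)` loop, then counter += 1
def ndoorsLoop (n counter : Int) (od : List Int) : List Int :=
  if _h : counter ≤ n then
    ndoorsLoop n (counter + 1) ((PySem.List.pyRange counter (n + 1) counter).foldl pyTog od)
  else od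
termination_by (n + 1 - counter).toNat
decreasing_by omega

def ndoors (num_of_doors : Int) : List Int :=
  ndoorsLoop num_of_doors 2
    ((PySem.List.pyRange 1 (num_of_doors + 1) 1).foldl (fun acc i => acc ++ [i]) [])

-- ===== PORT B =====
-- `while k * k <= num_of_doors: open_doors.append(k * k); k += 1`
def ndoorsAltLoop (num k : Int) (open_doors : List Int) : List Int :=
  if _h : k * k ≤ num then ndoorsAltLoop num (k + 1) (open_doors ++ [k * k]) else open_doors
termination_by (num + 1 - k).toNat
decreasing_by
  have hk : k ≤ num := by
    rcases le_or_gt k 0 with h0 | h0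
    · nlinarith [mul_self_nonneg k]
    · nlinarith
  omega

def ndoors_alt (num_of_doors : Int) : List Int :=
  ndoorsAltLoop num_of_doors 1 []

-- ===== PRECONDITION & SPEC =====
def Spec_ndoors (num_of_doors : Int) (out : List Int) : Prop := out = ndoors_alt num_of_doors
instance (num_of_doors : Int) (out : List Int) : Decidable (Spec_ndoors num_of_doors out) := by unfold Spec_ndoors; infer_instance

-- ===== CLAIM (what is proved, stated in full; the proofs are below) =====
def Claim_equal_ndoors : Prop := ∀ (num_of_doors : Int), Dom_ndoors num_of_doors → Spec_ndoors num_of_doors (ndoors num_of_doors)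

-- ===== LEMMAS AND PROOFS =====

-- the ascending perfect squares in [1, m] (proof-side characterisation of both results)
def sqList (m : Int) : List Int :=
  (PySem.List.pyRange 1 (m + 1) 1).filter (fun i => decide (IsSquare i))

-- number of divisors of x lying in [2, t]
def cnt (t x : Int) : Nat :=
  ((Finset.Icc 2 t.toNat).filter (fun d : Nat => ((d : Int) ∣ x))).card

-- A-loop invariant after all counters ≤ t have been processed
def InvA (n t : Int) (od : List Int) : Prop :=
  od.Nodup ∧ (∀ x : Int, x ∈ od ↔ 1 ≤ x ∧ x ≤ n ∧ Even (cnt t x)) ∧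
    od.filter (fun i => decide (i ≤ t)) = sqList t

lemma pyTog_nodup {od : List Int} {i : Int} (h : od.Nodup) : (pyTog od i).Nodup := by
  unfold pyTog
  split
  · exact h.erase i
  · next hni =>
    exact List.Nodup.append h (List.nodup_singleton i) (by simpa using hni)

lemma mem_pyTog {od : List Int} {i x : Int} (h : od.Nodup) :
    x ∈ pyTog od i ↔ (if x = i then i ∉ od else x ∈ od) := by
  unfold pyTog
  by_cases hx : x = i
  · subst hx
    split <;> simp_all [h.mem_erase_iff]
  · split <;> simp [h.mem_erase_iff, hx]

lemma pyTog_filter {od : List Int} {i : Int} (p : Int → Bool) (h : od.Nodup)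
    (hp : p i = false) : (pyTog od i).filter p = od.filter p := by
  unfold pyTog
  split
  · rw [h.erase_eq_filter, List.filter_filter]
    apply List.filter_congr
    intro x _
    by_cases hx : x = i <;> simp [hx, hp]
  · simp [hp]

lemma foldTog_nodup_mem : ∀ (ms od : List Int), ms.Nodup → od.Nodup →
    (List.foldl pyTog od ms).Nodup ∧
      (∀ x, x ∈ List.foldl pyTog od ms ↔ ((x ∈ od) ↔ x ∉ ms)) := by
  intro ms
  induction ms with
  | nil => intro od _ hod; simp [hod]
  | cons m ms ih =>
    intro od hms hod
    have hm : m ∉ ms := (List.nodup_cons.mp hms).1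
    obtain ⟨ih1, ih2⟩ := ih (pyTog od m) (List.nodup_cons.mp hms).2 (pyTog_nodup hod)
    refine ⟨ih1, fun x => ?_⟩
    rw [List.foldl_cons, ih2 x, mem_pyTog hod]
    by_cases hx : x = m
    · subst hx
      simp only [List.mem_cons]
      tauto
    · simp only [if_neg hx, List.mem_cons]
      tauto

lemma foldTog_filter (p : Int → Bool) : ∀ (ms od : List Int), od.Nodup →
    (∀ m ∈ ms, p m = false) →
    (List.foldl pyTog od ms).filter p = od.filter p := by
  intro ms
  induction ms with
  | nil => intro od _ _; rfl
  | cons m ms ih =>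
    intro od hod hp
    rw [List.foldl_cons, ih (pyTog od m) (pyTog_nodup hod) (fun x hx => hp x (by simp [hx])),
      pyTog_filter p hod (hp m (by simp))]

lemma pyRange_pos_cons {a b s : Int} (hs : 0 < s) (hab : a < b) :
    PySem.List.pyRange a b s = a :: PySem.List.pyRange (a + s) b s := by
  rw [PySem.List.pyRange_of_pos a b hs, PySem.List.pyRange_of_pos (a + s) b hs]
  have h1 : ((b - a + s - 1) / s).toNat =
      (if a + s < b then ((b - (a + s) + s - 1) / s).toNat else 0) + 1 := by
    by_cases h2 : a + s < b
    · have : b - a + s - 1 = (b - (a + s) + s - 1) + 1 * s := by ring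
      rw [this, Int.add_mul_ediv_right _ _ (by omega)]
      have hnn : 0 ≤ (b - (a + s) + s - 1) / s := Int.ediv_nonneg (by omega) (by omega)
      simp [h2]
      omega
    · have : (b - a + s - 1) / s = 1 := by
        have : b - a + s - 1 = (b - a - 1) + 1 * s := by ring
        rw [this, Int.add_mul_ediv_right _ _ (by omega)]
        have : (b - a - 1) / s = 0 := Int.ediv_eq_zero_of_lt (by omega) (by omega)
        omega
      simp [h2, this]
  rw [if_pos hab, h1, List.range_succ_eq_map]
  simp only [List.map_cons, List.map_map, Function.comp_def]
  congr 1
  · simp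
  · apply List.map_congr_left
    intro k _
    push_cast
    ring

lemma nodup_pyRange_pos {a b s : Int} (hs : 0 < s) :
    (PySem.List.pyRange a b s).Nodup := by
  rw [PySem.List.pyRange_of_pos a b hs]
  refine List.Nodup.map ?_ (List.nodup_range)
  intro x y hxy
  have h2 := add_left_cancel hxy
  have := mul_left_cancel₀ (by omega : (s : Int) ≠ 0) h2
  exact_mod_cast this

lemma cnt_one (x : Int) : cnt 1 x = 0 := by
  unfold cnt
  simp

lemma cnt_succ (x c : Int) (hc : 2 ≤ c) :
    cnt c x = cnt (c - 1) x + (if c ∣ x then 1 else 0) := by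
  unfold cnt
  have h1 : (c - 1).toNat = c.toNat - 1 := by omega
  have h2 : Finset.Icc 2 c.toNat = insert c.toNat (Finset.Icc 2 (c.toNat - 1)) := by
    ext d
    simp only [Finset.mem_Icc, Finset.mem_insert]
    omega
  have hmem : c.toNat ∉ (Finset.Icc 2 (c.toNat - 1)).filter (fun d : Nat => ((d : Int) ∣ x)) := by
    intro h
    have := Finset.mem_of_mem_filter _ h
    simp only [Finset.mem_Icc] at this
    omega
  have hcast : ((c.toNat : Int)) = c := by omega
  rw [h1, h2, Finset.filter_insert]
  by_cases hd : c ∣ x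
  · rw [if_pos (by rw [hcast]; exact hd), if_pos hd, Finset.card_insert_of_notMem hmem]
  · rw [if_neg (by rw [hcast]; exact hd), if_neg hd, Nat.add_zero]

lemma tau_odd_iff (m : Nat) (hm : 1 ≤ m) : Odd m.divisors.card ↔ IsSquare m := by
  classical
  set D := m.divisors with hD
  have hsplit : (D.filter (fun d => d * d = m)).card + (D.filter (fun d => ¬ d * d = m)).card = D.card :=
    Finset.card_filter_add_card_filter_not _
  have hm0 : m ≠ 0 := by omega
  have heven : Even ((D.filter (fun d => ¬ d * d = m)).card) := by
    rw [even_iff_two_dvd, ← ZMod.natCast_eq_zero_iff]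
    have hsum : (((D.filter (fun d => ¬ d * d = m)).card : ZMod 2)) =
        ∑ _x ∈ D.filter (fun d => ¬ d * d = m), (1 : ZMod 2) := by simp
    rw [hsum]
    refine Finset.sum_involution (fun a _ => m / a) (fun a _ => by decide) ?_ ?_ ?_
    · intro a ha _
      simp only [Finset.mem_filter, hD, Nat.mem_divisors] at ha
      obtain ⟨⟨hdvd, _⟩, hne⟩ := ha
      intro heq
      apply hne
      have heq' : m / a = a := heq
      have hma : a * (m / a) = m := Nat.mul_div_cancel' hdvd
      rw [heq'] at hma
      exact hma
    · intro a ha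
      simp only [Finset.mem_filter, hD, Nat.mem_divisors] at ha ⊢
      obtain ⟨⟨hdvd, _⟩, hne⟩ := ha
      have ha0 : a ≠ 0 := by rintro rfl; exact hm0 (Nat.eq_zero_of_zero_dvd hdvd)
      have hma : a * (m / a) = m := Nat.mul_div_cancel' hdvd
      have hq0 : m / a ≠ 0 := by
        intro h0; rw [h0, Nat.mul_zero] at hma; exact hm0 hma.symm
      refine ⟨⟨Nat.div_dvd_of_dvd hdvd, hm0⟩, ?_⟩
      intro heq
      have : a * (m / a) = (m / a) * (m / a) := by rw [hma, heq]
      have : a = m / a := Nat.eq_of_mul_eq_mul_right (Nat.pos_of_ne_zero hq0) this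
      exact hne (by rw [this, heq])
    · intro a ha
      simp only [Finset.mem_filter, hD, Nat.mem_divisors] at ha
      exact Nat.div_div_self ha.1.1 hm0
  have hF : (D.filter (fun d => d * d = m)).card = (if IsSquare m then 1 else 0) := by
    by_cases hs : IsSquare m
    · obtain ⟨k, hk⟩ := hs
      rw [if_pos ⟨k, hk⟩]
      have : D.filter (fun d => d * d = m) = {k} := by
        ext d
        simp only [Finset.mem_filter, hD, Nat.mem_divisors, Finset.mem_singleton]
        constructor
        · rintro ⟨_, hdd⟩
          exact Nat.mul_self_inj.mp (by rw [hdd, hk])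
        · rintro rfl
          exact ⟨⟨⟨d, hk⟩, hm0⟩, hk.symm⟩
      rw [this, Finset.card_singleton]
    · rw [if_neg hs]
      have : D.filter (fun d => d * d = m) = ∅ :=
        Finset.filter_eq_empty_iff.mpr (fun {d} _ hdd => hs ⟨d, hdd.symm⟩)
      rw [this, Finset.card_empty]
  rw [Nat.even_iff] at heven
  by_cases hs : IsSquare m
  · rw [Nat.odd_iff, ← hsplit, hF, if_pos hs]
    simp only [hs, iff_true]
    omega
  · rw [Nat.odd_iff, ← hsplit, hF, if_neg hs]
    simp only [hs, iff_false]
    omega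

lemma even_cnt_pred_iff (c : Int) (hc : 2 ≤ c) : Even (cnt (c - 1) c) ↔ ¬ IsSquare c := by
  set m : Nat := c.toNat with hmdef
  have hm2 : 2 ≤ m := by omega
  have hcm : ((m : Int)) = c := by omega
  have h1 : cnt (c - 1) c = ((Finset.Icc 2 (m - 1)).filter (fun d : Nat => d ∣ m)).card := by
    unfold cnt
    congr 1
    have ht : (c - 1).toNat = m - 1 := by omega
    rw [ht]
    apply Finset.filter_congr
    intro d _
    rw [← hcm]
    simp [Int.natCast_dvd_natCast]
  have h2 : (Finset.Icc 2 (m - 1)).filter (fun d : Nat => d ∣ m) = m.divisors \ {1, m} := by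
    ext d
    simp only [Finset.mem_filter, Finset.mem_Icc, Finset.mem_sdiff, Nat.mem_divisors,
      Finset.mem_insert, Finset.mem_singleton]
    constructor
    · rintro ⟨⟨h2d, hdm⟩, hdvd⟩
      exact ⟨⟨hdvd, by omega⟩, by omega⟩
    · rintro ⟨⟨hdvd, hm0⟩, hne⟩
      have hd0 : d ≠ 0 := by rintro rfl; exact hm0 (Nat.eq_zero_of_zero_dvd hdvd)
      have hdle : d ≤ m := Nat.le_of_dvd (by omega) hdvd
      have hne' : d ≠ 1 ∧ d ≠ m := ⟨fun h => hne (Or.inl h), fun h => hne (Or.inr h)⟩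
      obtain ⟨hne1, hnem⟩ := hne'
      exact ⟨⟨by omega, by omega⟩, hdvd⟩
  have hsub : ({1, m} : Finset Nat) ⊆ m.divisors := by
    intro d hd
    simp only [Finset.mem_insert, Finset.mem_singleton] at hd
    rcases hd with rfl | rfl
    · exact Nat.one_mem_divisors.mpr (by omega)
    · exact Nat.mem_divisors.mpr ⟨dvd_rfl, by omega⟩
  have hcard2 : ({1, m} : Finset Nat).card = 2 := by
    rw [Finset.card_insert_of_notMem (by simp; omega), Finset.card_singleton]
  have h3 : ((Finset.Icc 2 (m - 1)).filter (fun d : Nat => d ∣ m)).card = m.divisors.card - 2 := by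
    rw [h2, Finset.card_sdiff, Finset.inter_eq_left.mpr hsub, hcard2]
  have htau : 2 ≤ m.divisors.card := by
    calc 2 = ({1, m} : Finset Nat).card := hcard2.symm
    _ ≤ m.divisors.card := Finset.card_le_card hsub
  have hodd := tau_odd_iff m (by omega)
  have hsq : IsSquare c ↔ IsSquare m := by rw [← hcm]; exact Int.isSquare_natCast_iff
  rw [h1, h3, hsq]
  rw [Nat.even_iff, ← hodd, Nat.odd_iff]
  omega

lemma sqList_succ (c : Int) (hc : 1 ≤ c) :
    sqList c = sqList (c - 1) ++ (if IsSquare c then [c] else []) := by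
  unfold sqList
  have h1 : PySem.List.pyRange 1 (c + 1) 1 = PySem.List.pyRange 1 c 1 ++ [c] := by
    have := PySem.List.pyRange_one_succ_right (a := 1) (b := c) (by omega)
    simpa using this
  have h2 : (c : Int) - 1 + 1 = c := by ring
  rw [h1, List.filter_append, h2]
  congr 1
  by_cases hs : IsSquare c <;> simp [hs]

lemma pass_inv (n c : Int) (od : List Int) (hc2 : 2 ≤ c) (hcn : c ≤ n)
    (h : InvA n (c - 1) od) :
    InvA n c ((PySem.List.pyRange c (n + 1) c).foldl pyTog od) := by
  obtain ⟨hnd, hmem, hfil⟩ := h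
  have hc0 : (0 : Int) < c := by omega
  have hms_nodup : (PySem.List.pyRange c (n + 1) c).Nodup := nodup_pyRange_pos hc0
  have hmemms : ∀ x, x ∈ PySem.List.pyRange c (n + 1) c ↔ (c ∣ x ∧ c ≤ x ∧ x ≤ n) := by
    intro x
    rw [PySem.List.mem_pyRange_iff_of_pos hc0 x]
    constructor
    · rintro ⟨h1, h2, h3⟩
      refine ⟨?_, h1, by omega⟩
      have := dvd_add h3 (dvd_refl c)
      simpa using this
    · rintro ⟨h1, h2, h3⟩
      refine ⟨h2, by omega, ?_⟩
      have := dvd_sub h1 (dvd_refl c)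
      simpa using this
  obtain ⟨hnd', hmem'⟩ := foldTog_nodup_mem _ od hms_nodup hnd
  refine ⟨hnd', ?_, ?_⟩
  · intro x
    rw [hmem' x, hmem x]
    have hcnt := cnt_succ x c hc2
    have hM := hmemms x
    by_cases hd : c ∣ x
    · have he : Even (cnt c x) ↔ ¬ Even (cnt (c - 1) x) := by
        rw [hcnt, if_pos hd]
        exact Nat.even_add_one
      by_cases hx1 : 1 ≤ x
      · have hcx : c ≤ x := Int.le_of_dvd (by omega) hd
        by_cases hxn : x ≤ n
        · rw [he]
          simp only [hM, hd, hcx, hxn, and_self, true_and]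
          tauto
        · rw [he]
          simp only [hM]
          tauto
      · have hncx : ¬ c ≤ x := by omega
        rw [he]
        simp only [hM]
        tauto
    · have he : cnt c x = cnt (c - 1) x := by rw [hcnt, if_neg hd]; omega
      rw [he]
      simp only [hM]
      tauto
  · rw [pyRange_pos_cons hc0 (by omega : c < n + 1), List.foldl_cons]
    have hrest : ∀ m ∈ PySem.List.pyRange (c + c) (n + 1) c,
        (fun i => decide (i ≤ c)) m = false := by
      intro m hm
      rw [PySem.List.mem_pyRange_iff_of_pos hc0 m] at hm
      exact decide_eq_false (by omega)
    rw [foldTog_filter _ _ _ (pyTog_nodup hnd) hrest]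
    have hcmem : c ∈ od ↔ Even (cnt (c - 1) c) := by
      rw [hmem c]
      have h1n : (1 : Int) ≤ c := by omega
      tauto
    unfold pyTog
    by_cases hc_in : c ∈ od
    · rw [if_pos hc_in]
      have hnotsq : ¬ IsSquare c := (even_cnt_pred_iff c hc2).mp (hcmem.mp hc_in)
      rw [hnd.erase_eq_filter, List.filter_filter]
      have hpt : List.filter (fun a => decide (a ≤ c) && (a != c)) od =
          List.filter (fun a : Int => decide (a ≤ c - 1)) od := by
        apply List.filter_congr
        intro a _
        by_cases ha : a = c
        · have e2 : ¬ (c ≤ c - 1) := by omega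
          simp only [ha]
          simp [e2]
        · by_cases h2 : a < c
          · have e1 : a ≤ c := by omega
            have e2 : a ≤ c - 1 := by omega
            simp [e1, e2, ha]
          · have e1 : ¬ a ≤ c := by omega
            have e2 : ¬ a ≤ c - 1 := by omega
            simp [e1, e2]
      rw [hpt, hfil, sqList_succ c (by omega), if_neg hnotsq, List.append_nil]
    · rw [if_neg hc_in]
      have hsq : IsSquare c := by
        by_contra hns
        exact hc_in (hcmem.mpr ((even_cnt_pred_iff c hc2).mpr hns))
      rw [List.filter_append]
      have h2 : List.filter (fun i => decide (i ≤ c)) [c] = [c] := by simp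
      have h3 : od.filter (fun i => decide (i ≤ c)) =
          od.filter (fun i => decide (i ≤ c - 1)) := by
        apply List.filter_congr
        intro a ha
        have hac : a ≠ c := fun e => hc_in (e ▸ ha)
        apply decide_eq_decide.mpr
        omega
      rw [h2, h3, hfil, sqList_succ c (by omega), if_pos hsq]

lemma exit_inv (n : Int) (od : List Int) (h : InvA n n od) : od = sqList n := by
  obtain ⟨_, hmem, hfil⟩ := h
  have : od.filter (fun i => decide (i ≤ n)) = od :=
    List.filter_eq_self.mpr (fun x hx => decide_eq_true ((hmem x).mp hx).2.1)
  rw [← this, hfil]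

lemma loop_eq (n : Int) : ∀ (c : Int) (od : List Int), 2 ≤ c → c ≤ n + 1 →
    InvA n (c - 1) od → ndoorsLoop n c od = sqList n := by
  suffices H : ∀ (t : Nat) (c : Int) (od : List Int), (n + 1 - c).toNat ≤ t → 2 ≤ c →
      c ≤ n + 1 → InvA n (c - 1) od → ndoorsLoop n c od = sqList n by
    intro c od h2 hn hinv
    exact H (n + 1 - c).toNat c od le_rfl h2 hn hinv
  intro t
  induction t with
  | zero =>
    intro c od ht h2 hn hinv
    have hc : c = n + 1 := by omega
    rw [ndoorsLoop, dif_neg (by omega)]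
    subst hc
    exact exit_inv n od (by simpa using hinv)
  | succ t ih =>
    intro c od ht h2 hn hinv
    rw [ndoorsLoop]
    by_cases hle : c ≤ n
    · rw [dif_pos hle]
      have hinv' := pass_inv n c od h2 hle hinv
      exact ih (c + 1) _ (by omega) (by omega) (by omega)
        (by simpa using hinv')
    · rw [dif_neg hle]
      have hc : c = n + 1 := by omega
      subst hc
      exact exit_inv n od (by simpa using hinv)

lemma base_inv (n : Int) (hn : 1 ≤ n) : InvA n 1 (PySem.List.pyRange 1 (n + 1) 1) := by
  refine ⟨nodup_pyRange_pos (by omega), ?_, ?_⟩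
  · intro x
    rw [PySem.List.mem_pyRange_one, cnt_one]
    constructor
    · rintro ⟨h1, h2⟩
      exact ⟨h1, by omega, ⟨0, rfl⟩⟩
    · rintro ⟨h1, h2, _⟩
      exact ⟨h1, by omega⟩
  · rw [PySem.List.pyRange_one_append 1 2 (n + 1) (by omega) (by omega), List.filter_append]
    have h1 : PySem.List.pyRange 1 2 1 = [1] := by decide
    have h2 : (PySem.List.pyRange 2 (n + 1) 1).filter (fun i => decide (i ≤ 1)) = [] := by
      rw [List.filter_eq_nil_iff]
      intro a ha
      rw [PySem.List.mem_pyRange_one] at ha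
      simp
      omega
    rw [h1, h2]
    unfold sqList
    have h3 : (1 : Int) + 1 = 2 := by norm_num
    rw [h3, h1]
    simp [show IsSquare (1 : Int) from ⟨1, (one_mul 1).symm⟩]

lemma no_sq_between (k x : Int) (hk : 1 ≤ k) (h1 : k * k < x) (h2 : x < (k + 1) * (k + 1)) :
    ¬ IsSquare x := by
  rintro ⟨r, rfl⟩
  set t : Int := (r.natAbs : Int) with ht
  have htt : t * t = r * r := by
    simpa [ht] using Int.natAbs_mul_self (a := r)
  have ht0 : 0 ≤ t := by positivity
  rcases le_or_gt t k with h | h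
  · have := mul_self_le_mul_self ht0 h
    omega
  · have hk1 : k + 1 ≤ t := by omega
    have := mul_self_le_mul_self (by omega : (0:Int) ≤ k + 1) hk1
    omega

lemma altLoop_eq (n : Int) : ∀ (k : Int) (acc : List Int), 1 ≤ k →
    ndoorsAltLoop n k acc =
      acc ++ (PySem.List.pyRange (k * k) (n + 1) 1).filter (fun i => decide (IsSquare i)) := by
  suffices H : ∀ (t : Nat) (k : Int) (acc : List Int), (n + 1 - k).toNat ≤ t → 1 ≤ k →
      ndoorsAltLoop n k acc =
        acc ++ (PySem.List.pyRange (k * k) (n + 1) 1).filter (fun i => decide (IsSquare i)) by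
    intro k acc hk
    exact H (n + 1 - k).toNat k acc le_rfl hk
  intro t
  induction t with
  | zero =>
    intro k acc ht hk
    have hkn : ¬ k * k ≤ n := by
      intro hkk
      have : k ≤ n := by nlinarith
      omega
    rw [ndoorsAltLoop, dif_neg hkn,
      PySem.List.pyRange_one_eq_nil (by linarith [not_le.mp hkn] : n + 1 ≤ k * k)]
    simp
  | succ t ih =>
    intro k acc ht hk
    rw [ndoorsAltLoop]
    by_cases hkk : k * k ≤ n
    · rw [dif_pos hkk]
      have hkn : k ≤ n := by nlinarith
      rw [ih (k + 1) _ (by omega) (by omega)]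
      have hsplit : PySem.List.pyRange (k * k) (n + 1) 1 =
          k * k :: PySem.List.pyRange (k * k + 1) (n + 1) 1 :=
        PySem.List.pyRange_one_cons (by omega)
      have hmid : (PySem.List.pyRange (k * k + 1) (n + 1) 1).filter
            (fun i => decide (IsSquare i)) =
          (PySem.List.pyRange ((k + 1) * (k + 1)) (n + 1) 1).filter
            (fun i => decide (IsSquare i)) := by
        have hb1 : k * k + 1 ≤ min ((k + 1) * (k + 1)) (n + 1) :=
          le_min (by nlinarith) (by omega)
        have hb2 : min ((k + 1) * (k + 1)) (n + 1) ≤ n + 1 := min_le_right _ _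
        rw [PySem.List.pyRange_one_append (k * k + 1) (min ((k + 1) * (k + 1)) (n + 1)) (n + 1)
          hb1 hb2, List.filter_append]
        have hdead : (PySem.List.pyRange (k * k + 1) (min ((k + 1) * (k + 1)) (n + 1)) 1).filter
            (fun i => decide (IsSquare i)) = [] := by
          rw [List.filter_eq_nil_iff]
          intro a ha
          rw [PySem.List.mem_pyRange_one] at ha
          obtain ⟨ha1, ha2⟩ := ha
          have hns : ¬ IsSquare a :=
            no_sq_between k a hk (by omega)
              (lt_of_lt_of_le ha2 (min_le_left _ _))
          simpa using hns
        rw [hdead, List.nil_append]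
        rcases le_or_gt ((k + 1) * (k + 1)) (n + 1) with hle | hgt
        · rw [min_eq_left hle]
        · rw [min_eq_right (by omega)]
          rw [PySem.List.pyRange_one_eq_nil le_rfl,
            PySem.List.pyRange_one_eq_nil (by omega)]
      rw [hsplit]
      have hq : decide (IsSquare (k * k)) = true := decide_eq_true ⟨k, rfl⟩
      simp only [List.filter_cons, hq, if_true, hmid]
      simp
    · rw [dif_neg hkk,
        PySem.List.pyRange_one_eq_nil (by linarith [not_le.mp hkk] : n + 1 ≤ k * k)]
      simp

-- ===== VERDICT (by name: the statement is the Claim_ definition above) =====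
theorem ndoors_spec : Claim_equal_ndoors := by
  intro n _
  unfold Spec_ndoors ndoors ndoors_alt
  rw [PySem.List.foldl_append_singleton, List.nil_append,
    altLoop_eq n 1 [] le_rfl, List.nil_append, one_mul]
  show ndoorsLoop n 2 _ = sqList n
  rcases le_or_gt 1 n with hn | hn
  · exact loop_eq n 2 _ le_rfl (by omega) (by simpa using base_inv n hn)
  · rw [ndoorsLoop]
    rw [dif_neg (by omega)]
    rw [PySem.List.pyRange_one_eq_nil (by omega)]
    unfold sqList
    rw [PySem.List.pyRange_one_eq_nil (by omega)]
    simp
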